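-- pv_equiv track=rewrite | github.com/kamilprz/foobar | Level 3/Doomsday Fuel/lvl3.2.py | standardForm
-- ===== SOURCE A (Python) =====
-- def standardForm(m):
--     term = []
--     nonTerm = []
--     for row in range(len(m)):
--         if all(x == 0 for x in m[row]):
--             term.append(m[row])
--         else:
--             nonTerm.append(m[row])
--     standardM = term + nonTerm
--     return standardM
-- ===== SOURCE B (Python) =====
-- def standardForm(m):
--     return sorted(m, key=lambda row: any(x != 0 for x in row))
-- ===== Notes on version B (the rewrite author's own statement) =====
-- stated objective: idiomatic
-- what changed: Replaced the explicit two-list scan-and-append partition with a single stable sort keyed on the boolean 'row has a nonzero entry' (all-zero rows sort first, stability preserves original order within each group).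
import Mathlib
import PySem

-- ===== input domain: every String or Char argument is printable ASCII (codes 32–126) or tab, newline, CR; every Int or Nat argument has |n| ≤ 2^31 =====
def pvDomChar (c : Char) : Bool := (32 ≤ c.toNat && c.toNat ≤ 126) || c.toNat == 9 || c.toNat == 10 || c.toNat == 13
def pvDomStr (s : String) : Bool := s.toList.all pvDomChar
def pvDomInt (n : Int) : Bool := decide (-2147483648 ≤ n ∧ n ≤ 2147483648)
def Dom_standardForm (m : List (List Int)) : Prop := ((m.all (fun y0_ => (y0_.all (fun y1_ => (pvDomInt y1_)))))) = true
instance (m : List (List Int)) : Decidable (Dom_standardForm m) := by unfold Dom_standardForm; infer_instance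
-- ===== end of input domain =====

-- B replaces A's explicit two-list partition loop with a single stable sort on the
-- boolean key "row has a nonzero entry" (more idiomatic; same return value).

-- ===== PORT A =====
-- the for-loop over range(len(m)) reads m[row] for each index in order, i.e. folds over the rows
def standardForm (m : List (List Int)) : List (List Int) :=
  let acc := m.foldl
    (fun (acc : List (List Int) × List (List Int)) row =>
      if row.all (fun x => x == 0) then (acc.1 ++ [row], acc.2) else (acc.1, acc.2 ++ [row]))
    ([], [])
  acc.1 ++ acc.2

-- ===== PORT B =====
def standardForm_alt (m : List (List Int)) : List (List Int) :=
  PySem.List.sorted m (fun row => row.any (fun x => x != 0)) false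

-- ===== PRECONDITION & SPEC =====
def Spec_standardForm (m : List (List Int)) (out : List (List Int)) : Prop := out = standardForm_alt m
instance (m : List (List Int)) (out : List (List Int)) : Decidable (Spec_standardForm m out) := by unfold Spec_standardForm; infer_instance

-- ===== CLAIM (what is proved, stated in full; the proofs are below) =====
def Claim_equal_standardForm : Prop := ∀ (m : List (List Int)), Dom_standardForm m → Spec_standardForm m (standardForm m)

-- ===== LEMMAS AND PROOFS =====

-- the boolean sort key of B
def pvKey (row : List Int) : Bool := row.any (fun x => x != 0)

-- A's branch test is the negation of B's key
lemma pvAll_eq_not_key (row : List Int) :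
    row.all (fun x => x == 0) = !pvKey row := by
  simp [pvKey, List.all_eq_not_any_not, bne]

-- inserting a key-true row goes to the very end
lemma pvInsert_true (x : List Int) (l : List (List Int)) (hx : pvKey x = true) :
    PySem.List.insertBy (fun a b => decide (pvKey a < pvKey b)) x l = l ++ [x] := by
  apply PySem.List.insertBy_of_forall_not_before
  intro y _
  simp [hx, Bool.lt_iff]

-- inserting a key-false row into falses ++ trues lands between the groups
lemma pvInsert_false (x : List Int) (t n : List (List Int)) (hx : pvKey x = false)
    (ht : ∀ r ∈ t, pvKey r = false) (hn : ∀ r ∈ n, pvKey r = true) :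
    PySem.List.insertBy (fun a b => decide (pvKey a < pvKey b)) x (t ++ n)
      = t ++ (x :: n) := by
  induction t with
  | nil =>
    cases n with
    | nil => simp [PySem.List.insertBy]
    | cons y ys =>
      have hy : pvKey y = true := hn y (by simp)
      simp [PySem.List.insertBy, hx, hy, Bool.lt_iff]
  | cons r rs ih =>
    have hr : pvKey r = false := ht r (by simp)
    have := ih (fun q hq => ht q (by simp [hq]))
    simp [PySem.List.insertBy, hx, hr, Bool.lt_iff] at this ⊢
    exact this

-- the fold of insertions equals A's partition fold, for any well-split accumulator
lemma pvMain (m : List (List Int)) :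
    ∀ (t n : List (List Int)),
      (∀ r ∈ t, pvKey r = false) → (∀ r ∈ n, pvKey r = true) →
      m.foldl (fun acc x => PySem.List.insertBy (fun a b => decide (pvKey a < pvKey b)) x acc) (t ++ n)
        = (m.foldl
            (fun (acc : List (List Int) × List (List Int)) row =>
              if row.all (fun x => x == 0) then (acc.1 ++ [row], acc.2) else (acc.1, acc.2 ++ [row]))
            (t, n)).1
          ++ (m.foldl
            (fun (acc : List (List Int) × List (List Int)) row =>
              if row.all (fun x => x == 0) then (acc.1 ++ [row], acc.2) else (acc.1, acc.2 ++ [row]))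
            (t, n)).2 := by
  induction m with
  | nil => intro t n _ _; rfl
  | cons row rest ih =>
    intro t n ht hn
    by_cases h : pvKey row = true
    · have hall : row.all (fun x => x == 0) = false := by
        rw [pvAll_eq_not_key, h]; rfl
      have h1 : PySem.List.insertBy (fun a b => decide (pvKey a < pvKey b)) row (t ++ n)
          = t ++ (n ++ [row]) := by
        rw [pvInsert_true row (t ++ n) h, List.append_assoc]
      simp only [List.foldl_cons, hall, Bool.false_eq_true, if_false, h1]
      exact ih t (n ++ [row]) ht (by
        intro r hr
        rcases List.mem_append.mp hr with h2 | h2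
        · exact hn r h2
        · simp at h2; subst h2; exact h)
    · have hf : pvKey row = false := by revert h; cases pvKey row <;> simp
      have hall : row.all (fun x => x == 0) = true := by
        rw [pvAll_eq_not_key, hf]; rfl
      have h1 : PySem.List.insertBy (fun a b => decide (pvKey a < pvKey b)) row (t ++ n)
          = (t ++ [row]) ++ n := by
        rw [pvInsert_false row t n hf ht hn, List.append_assoc]; rfl
      simp only [List.foldl_cons, hall, h1]
      exact ih (t ++ [row]) n (by
        intro r hr
        rcases List.mem_append.mp hr with h2 | h2
        · exact ht r h2
        · simp at h2; subst h2; exact hf) hn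

-- ===== VERDICT (by name: the statement is the Claim_ definition above) =====
theorem standardForm_spec : Claim_equal_standardForm := by
  intro m _
  unfold Spec_standardForm standardForm standardForm_alt
  rw [PySem.List.sorted_eq_foldl_insertBy]
  have := pvMain m [] [] (by simp) (by simp)
  simpa [pvKey] using this.symm
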